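-- pv_equiv track=rewrite | github.com/rahul94jh/abydos | abydos/phonetic.py | mra
-- ===== SOURCE A (Python) =====
-- from itertools import groupby, product
--
-- def _delete_consecutive_repeats(word):
--     """Delete consecutive repeated characters in a word.
--
--     :param str word: the word to transform
--     :returns: word with consecutive repeating characters collapsed to
--         a single instance
--     :rtype: str
--     """
--     return ''.join(char for char, _ in groupby(word))
--
-- def mra(word):
--     """Return the MRA personal numeric identifier (PNI) for a word.
--
--     A description of the Western Airlines Surname Match Rating Algorithm can
--     be found on page 18 of
--     https://archive.org/details/accessingindivid00moor
--
--     :param str word: the word to transform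
--     :returns: the MRA PNI
--     :rtype: str
--
--     >>> mra('Christopher')
--     'CHRPHR'
--     >>> mra('Niall')
--     'NL'
--     >>> mra('Smith')
--     'SMTH'
--     >>> mra('Schmidt')
--     'SCHMDT'
--     """
--     if not word:
--         return word
--     word = word.upper()
--     word = word.replace('ß', 'SS')
--     word = word[0]+''.join(c for c in word[1:] if
--                            c not in {'A', 'E', 'I', 'O', 'U'})
--     word = _delete_consecutive_repeats(word)
--     if len(word) > 6:
--         word = word[:3]+word[-3:]
--     return word
-- ===== SOURCE B (Python) =====
-- def mra(word):
--     """Return the MRA personal numeric identifier (PNI) for a word.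
--
--     Single stateful pass: keep the first character unconditionally, then for
--     each later character skip vowels and append it only if it differs from
--     the last character appended (fused vowel filter + repeat collapse).
--     """
--     if not word:
--         return word
--     word = word.upper()
--     out = word[0]
--     last = word[0]
--     for c in word[1:]:
--         if c in 'AEIOU':
--             continue
--         if c != last:
--             out += c
--             last = c
--     if len(out) > 6:
--         out = out[:3] + out[-3:]
--     return out
-- ===== Notes on version B (the rewrite author's own statement) =====
-- stated objective: simpler
-- what changed: A builds the code in three separate passes (vowel-filter comprehension, itertools.groupby repeat-collapse via a helper, then truncation); B fuses the filter and the collapse into one stateful loop that tracks the last appended character, dropping the groupby helper and the intermediate strings.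
import Mathlib
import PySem

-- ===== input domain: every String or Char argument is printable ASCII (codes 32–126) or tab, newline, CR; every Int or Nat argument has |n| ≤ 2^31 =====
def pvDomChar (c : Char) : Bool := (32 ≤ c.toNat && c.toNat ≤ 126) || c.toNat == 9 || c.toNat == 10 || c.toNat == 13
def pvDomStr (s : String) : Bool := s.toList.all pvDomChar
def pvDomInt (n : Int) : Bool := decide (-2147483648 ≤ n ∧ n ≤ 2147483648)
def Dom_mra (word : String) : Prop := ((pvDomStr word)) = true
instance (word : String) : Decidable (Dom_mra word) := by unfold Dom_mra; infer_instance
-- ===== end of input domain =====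

-- B fuses A's vowel-filter comprehension and groupby repeat-collapse into one stateful pass over the word (objective: simpler, same cost).


-- ===== PORT A =====
-- ''.join(char for char, _ in groupby(word)): keep the first char of each run
def dedupGo (prev : Char) : List Char → List Char
  | [] => []
  | c :: cs => if c = prev then dedupGo prev cs else c :: dedupGo c cs

def deleteConsecutiveRepeats : List Char → List Char
  | [] => []
  | c :: cs => c :: dedupGo c cs

def mra (word : String) : String :=
  if word.toList = [] then word
  else
    -- word = word.upper(); word = word.replace('ß', 'SS')
    let w := PySem.Chars.replace (PySem.Chars.upper word.toList) ['ß'] ['S', 'S']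
    -- word = word[0] + ''.join(c for c in word[1:] if c not in {'A','E','I','O','U'})
    let w := PySem.List.slice w none (some 1) ++
             (PySem.List.slice w (some 1) none).filter
               (fun c => ¬ c ∈ ['A', 'E', 'I', 'O', 'U'])
    let w := deleteConsecutiveRepeats w
    let w := if w.length > 6 then
               PySem.List.slice w none (some 3) ++ PySem.List.slice w (some (-3)) none
             else w
    String.ofList w

-- ===== PORT B =====
-- one loop iteration of B: state = (out so far, last appended char)
def stepB (st : List Char × Char) (c : Char) : List Char × Char :=
  if c ∈ ['A', 'E', 'I', 'O', 'U'] then st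
  else if c ≠ st.2 then (st.1 ++ [c], c) else st

-- one pass: for c in word[1:], skip vowels, append only if c differs from the last appended char
def mra_alt (word : String) : String :=
  if word.toList = [] then word
  else
    match PySem.Chars.upper word.toList with
    | [] => word   -- unreachable: upper preserves length
    | c0 :: rest =>
      let st := rest.foldl stepB ([c0], c0)
      let out := st.1
      let out := if out.length > 6 then
                   PySem.List.slice out none (some 3) ++ PySem.List.slice out (some (-3)) none
                 else out
      String.ofList out

-- ===== PRECONDITION & SPEC =====
def Spec_mra (word : String) (out : String) : Prop := out = mra_alt word
instance (word : String) (out : String) : Decidable (Spec_mra word out) := by unfold Spec_mra; infer_instance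

-- ===== CLAIM (what is proved, stated in full; the proofs are below) =====
def Claim_equal_mra : Prop := ∀ (word : String), Dom_mra word → Spec_mra word (mra word)

-- ===== LEMMAS AND PROOFS =====

-- B's loop invariant: the fold appends exactly the repeat-collapse of the vowel-filtered tail
theorem foldl_eq_dedup (cs : List Char) (acc : List Char) (last : Char) :
    (cs.foldl stepB (acc, last)).1
    = acc ++ dedupGo last (cs.filter (fun c => ¬ c ∈ ['A', 'E', 'I', 'O', 'U'])) := by
  induction cs generalizing acc last with
  | nil => simp [dedupGo]
  | cons c cs ih =>
    rw [List.foldl_cons, List.filter_cons]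
    by_cases hv : c ∈ ['A', 'E', 'I', 'O', 'U']
    · rw [show stepB (acc, last) c = (acc, last) from by simp [stepB, hv]]
      rw [if_neg (by simp [hv]), ih]
    · rw [if_pos (by simp [hv])]
      by_cases hl : c = last
      · rw [show stepB (acc, last) c = (acc, last) from by simp [stepB, hl]]
        rw [ih]
        simp only [dedupGo]
        rw [if_pos hl]
      · rw [show stepB (acc, last) c = (acc ++ [c], c) from by simp [stepB, hv, hl]]
        rw [ih]
        simp only [dedupGo]
        rw [if_neg hl]
        simp

-- uppercasing a printable-ASCII/whitespace char never yields 'ß'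
theorem upperChar_ne_eszett (c : Char) (h : pvDomChar c = true) :
    PySem.Chars.upperChar c ≠ 'ß' := by
  have hle : c.toNat ≤ 126 := by
    simp [pvDomChar] at h
    omega
  unfold PySem.Chars.upperChar
  by_cases hl : PySem.Chars.islower c = true
  · have hb : 97 ≤ c.toNat ∧ c.toNat ≤ 122 := by
      simp [PySem.Chars.islower, Char.le_def, UInt32.le_iff_toNat_le] at hl
      exact ⟨hl.1, hl.2⟩
    have hv : Nat.isValidChar (c.toNat - 32) := by left; omega
    rw [if_pos hl]
    intro hc
    have h1 : (Char.ofNat (c.toNat - 32)).toNat = c.toNat - 32 := by simp [Char.ofNat, hv]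
    rw [hc] at h1
    have h2 : ('ß').toNat = 223 := by decide
    omega
  · rw [if_neg hl]
    intro hc
    rw [hc] at hle
    exact absurd hle (by decide)

theorem eszett_not_mem_upper (l : List Char) (h : l.all pvDomChar = true) :
    'ß' ∉ PySem.Chars.upper l := by
  unfold PySem.Chars.upper
  intro hm
  rcases List.mem_map.mp hm with ⟨c, hc, he⟩
  exact upperChar_ne_eszett c (by simpa using (List.all_eq_true.mp h c hc)) he

-- replace.go with pattern ['ß'] walks the list untouched when 'ß' does not occur
theorem replace_go_noop (fuel : Nat) (l acc : List Char) (h : 'ß' ∉ l) :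
    PySem.Chars.replace.go ['ß'] ['S', 'S'] fuel l acc = acc.reverse ++ l := by
  induction fuel generalizing l acc with
  | zero => cases l <;> simp [PySem.Chars.replace.go]
  | succ fuel ih =>
    cases l with
    | nil => simp [PySem.Chars.replace.go]
    | cons c t =>
      have hc : c ≠ 'ß' := fun hc => h (by rw [hc]; exact List.mem_cons_self ..)
      have hne : (List.isPrefixOf ['ß'] (c :: t)) = false := by
        simp [List.isPrefixOf]
        exact fun h' => hc h'.symm
      simp only [PySem.Chars.replace.go, hne, Bool.false_eq_true, if_false]
      rw [ih t (c :: acc) (fun hm => h (List.mem_cons_of_mem c hm))]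
      simp

theorem replace_eszett_noop (l : List Char) (h : 'ß' ∉ l) :
    PySem.Chars.replace l ['ß'] ['S', 'S'] = l := by
  unfold PySem.Chars.replace
  simp only [List.isEmpty_cons, Bool.false_eq_true, if_false]
  rw [replace_go_noop l.length l [] h]
  simp

-- ===== VERDICT (by name: the statement is the Claim_ definition above) =====
theorem mra_spec : Claim_equal_mra := by
  intro word hdom
  unfold Spec_mra mra mra_alt
  cases hw : word.toList with
  | nil => simp
  | cons c cs =>
    have hall : word.toList.all pvDomChar = true := hdom
    rw [hw] at hall
    have hrep : PySem.Chars.replace (PySem.Chars.upper (c :: cs)) ['ß'] ['S', 'S']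
        = PySem.Chars.upper (c :: cs) :=
      replace_eszett_noop _ (eszett_not_mem_upper _ hall)
    have hu : PySem.Chars.upper (c :: cs)
        = PySem.Chars.upperChar c :: PySem.Chars.upper cs := by
      simp [PySem.Chars.upper]
    rw [hu] at hrep
    simp only [reduceCtorEq, if_false, hu, hrep]
    rw [PySem.List.slice_from_one]
    rw [PySem.List.slice_to _ (show (0 : Int) ≤ 1 by omega)]
    simp only [List.tail_cons, Int.toNat_one, List.take_succ_cons, List.take_zero]
    rw [foldl_eq_dedup]
    simp [deleteConsecutiveRepeats]
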